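-- pv_equiv track=rewrite | github.com/spartan289/PycharmProjects | learn/cses/digit_query.py | index_position
-- ===== SOURCE A (Python) =====
-- def index_position(n,pos):
--     i=1
--     while n>0:
--         tmp = n % 10
--         if i==pos:
--             return tmp
--         n = n//10
--         i+=1
--     return 0
-- ===== SOURCE B (Python) =====
-- def index_position(n, pos):
--     # Closed form: pos-th digit from the right; 0 for non-positive n or pos < 1.
--     if n <= 0 or pos < 1:
--         return 0
--     # Early out: if pos exceeds n's bit length then 10**(pos-1) > 2**(pos-1) > n,
--     # so the digit is 0 (also avoids building an astronomically large power).
--     if pos - 1 >= n.bit_length():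
--         return 0
--     return (n // 10 ** (pos - 1)) % 10
-- ===== Notes on version B (the rewrite author's own statement) =====
-- stated objective: idiomatic
-- what changed: Replaces the digit-by-digit while loop and counter with the closed-form expression (n // 10**(pos-1)) % 10, guarded by the validity check n > 0 and pos >= 1 and a bit_length early-out for positions past the last digit.
import Mathlib
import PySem

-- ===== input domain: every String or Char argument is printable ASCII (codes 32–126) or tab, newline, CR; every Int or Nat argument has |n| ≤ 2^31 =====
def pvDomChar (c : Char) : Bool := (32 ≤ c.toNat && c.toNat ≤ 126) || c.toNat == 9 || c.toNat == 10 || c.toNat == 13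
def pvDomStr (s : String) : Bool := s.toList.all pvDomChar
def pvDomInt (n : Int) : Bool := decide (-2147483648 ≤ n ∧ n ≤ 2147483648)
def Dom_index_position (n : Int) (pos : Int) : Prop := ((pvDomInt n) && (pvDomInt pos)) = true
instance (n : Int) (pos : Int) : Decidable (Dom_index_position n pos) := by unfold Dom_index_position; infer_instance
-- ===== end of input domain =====

-- B replaces A's digit-by-digit while loop with the closed-form (n // 10**(pos-1)) % 10
-- behind the natural validity guard n > 0 ∧ pos ≥ 1 (idiomatic; return value equivalence).

-- ===== PORT A =====
-- literal transliteration of A's while loop: state (n, i), counter i starts at 1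
def indexLoopA (n : Int) (i : Int) (pos : Int) : Int :=
  if h : 0 < n then
    let tmp := PySem.Int.mod n 10
    if i = pos then tmp
    else indexLoopA (PySem.Int.floordiv n 10) (i + 1) pos
  else 0
termination_by n.toNat
decreasing_by
  have hfd : PySem.Int.floordiv n 10 = n / 10 := PySem.Int.floordiv_eq_ediv_of_pos (by omega)
  rw [hfd]; omega

def index_position (n : Int) (pos : Int) : Int := indexLoopA n 1 pos

-- ===== PORT B =====
def index_position_alt (n : Int) (pos : Int) : Int :=
  if n ≤ 0 ∨ pos < 1 then 0
  -- n.bit_length() for n > 0 is Nat.log2 n.toNat + 1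
  else if ((Nat.log2 n.toNat + 1 : Nat) : Int) ≤ pos - 1 then 0
  else PySem.Int.mod (PySem.Int.floordiv n ((10 : Int) ^ (pos - 1).toNat)) 10

-- ===== PRECONDITION & SPEC =====
def Spec_index_position (n : Int) (pos : Int) (out : Int) : Prop := out = index_position_alt n pos
instance (n : Int) (pos : Int) (out : Int) : Decidable (Spec_index_position n pos out) := by unfold Spec_index_position; infer_instance

-- ===== CLAIM (what is proved, stated in full; the proofs are below) =====
def Claim_equal_index_position : Prop := ∀ (n : Int) (pos : Int), Dom_index_position n pos → Spec_index_position n pos (index_position n pos)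

-- ===== LEMMAS AND PROOFS =====

-- characterisation of A's loop: for 0 < n and i ≤ pos it returns the closed-form digit, otherwise 0
theorem indexLoopA_eq (k : Nat) : ∀ (n i pos : Int), n.toNat ≤ k →
    indexLoopA n i pos =
      if 0 < n ∧ i ≤ pos then PySem.Int.mod (PySem.Int.floordiv n ((10 : Int) ^ (pos - i).toNat)) 10
      else 0 := by
  induction k with
  | zero =>
    intro n i pos hk
    have hn : ¬ 0 < n := by omega
    rw [indexLoopA]
    simp [hn]
  | succ k ih =>
    intro n i pos hk
    by_cases hn : 0 < n
    · have hfd : PySem.Int.floordiv n 10 = n / 10 := PySem.Int.floordiv_eq_ediv_of_pos (by omega)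
      rw [indexLoopA]
      by_cases hip : i = pos
      · subst hip
        simp only [dif_pos hn, if_pos (⟨hn, le_rfl⟩ : 0 < n ∧ i ≤ i)]
        have h1 : (10 : Int) ^ (i - i).toNat = 1 := by norm_num
        rw [h1, PySem.Int.floordiv_eq_ediv_of_pos one_pos, Int.ediv_one]
        simp
      · simp only [dif_pos hn, if_neg hip]
        rw [ih (PySem.Int.floordiv n 10) (i + 1) pos (by rw [hfd]; omega)]
        by_cases hle : i ≤ pos
        · have hlt : i < pos := lt_of_le_of_ne hle hip
          have hexp : (pos - i).toNat = (pos - (i + 1)).toNat + 1 := by omega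
          by_cases hq : 0 < n / 10
          · rw [hfd, if_pos (⟨hq, by omega⟩ : 0 < n / 10 ∧ i + 1 ≤ pos), if_pos (⟨hn, hle⟩ : 0 < n ∧ i ≤ pos)]
            congr 1
            rw [PySem.Int.floordiv_eq_ediv_of_pos (b := (10:Int) ^ (pos - (i+1)).toNat) (by positivity),
                PySem.Int.floordiv_eq_ediv_of_pos (b := (10:Int) ^ (pos - i).toNat) (by positivity),
                hexp, pow_succ, mul_comm ((10:Int) ^ (pos - (i+1)).toNat) 10,
                ← Int.ediv_ediv_of_nonneg (by omega)]
          · -- n < 10, so n / 10^(pos-i) = 0 and both sides are 0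
            have hn10 : n < 10 := by
              by_contra hge
              omega
            have hzero : n / (10 : Int) ^ (pos - i).toNat = 0 := by
              apply Int.ediv_eq_zero_of_lt (le_of_lt hn)
              calc n < 10 := hn10
                _ ≤ (10 : Int) ^ (pos - i).toNat := by
                    have : 1 ≤ (pos - i).toNat := by omega
                    calc (10 : Int) = 10 ^ 1 := (pow_one 10).symm
                      _ ≤ 10 ^ (pos - i).toNat := pow_le_pow_right₀ (by omega) this
            rw [hfd, if_neg (show ¬ (0 < n / 10 ∧ i + 1 ≤ pos) by omega), if_pos (⟨hn, hle⟩ : 0 < n ∧ i ≤ pos),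
               PySem.Int.floordiv_eq_ediv_of_pos (by positivity), hzero]
            simp [PySem.Int.mod]
        · rw [hfd, if_neg (show ¬ (0 < n / 10 ∧ i + 1 ≤ pos) by omega),
               if_neg (show ¬ (0 < n ∧ i ≤ pos) by omega)]
    · rw [indexLoopA]; simp [hn]

-- ===== VERDICT (by name: the statement is the Claim_ definition above) =====
theorem index_position_spec : Claim_equal_index_position := by
  intro n pos _
  unfold Spec_index_position index_position index_position_alt
  rw [indexLoopA_eq n.toNat n 1 pos le_rfl]
  by_cases hn : 0 < n
  · by_cases hp : 1 ≤ pos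
    · rw [if_pos (⟨hn, hp⟩ : 0 < n ∧ 1 ≤ pos), if_neg (show ¬ (n ≤ 0 ∨ pos < 1) by omega)]
      by_cases hb : ((Nat.log2 n.toNat + 1 : Nat) : Int) ≤ pos - 1
      · rw [if_pos hb]
        -- past the bit length the digit is 0: n < 2^(pos-1) ≤ 10^(pos-1)
        have h2 : (n.toNat : Int) < (2 : Int) ^ (pos - 1).toNat := by
          have hlt : n.toNat < 2 ^ (Nat.log2 n.toNat + 1) := Nat.lt_log2_self
          have hle : 2 ^ (Nat.log2 n.toNat + 1) ≤ 2 ^ (pos - 1).toNat :=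
            Nat.pow_le_pow_right (by omega) (by omega)
          exact_mod_cast lt_of_lt_of_le hlt hle
        have hzero : n / (10 : Int) ^ (pos - 1).toNat = 0 := by
          apply Int.ediv_eq_zero_of_lt (le_of_lt hn)
          have h10 : (2 : Int) ^ (pos - 1).toNat ≤ (10 : Int) ^ (pos - 1).toNat :=
            pow_le_pow_left₀ (by omega) (by omega) _
          have : (n.toNat : Int) = n := by omega
          omega
        rw [PySem.Int.floordiv_eq_ediv_of_pos (by positivity), hzero]
        simp [PySem.Int.mod]
      · rw [if_neg hb]
    · rw [if_neg (show ¬ (0 < n ∧ 1 ≤ pos) by omega), if_pos (show n ≤ 0 ∨ pos < 1 by omega)]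
  · rw [if_neg (show ¬ (0 < n ∧ 1 ≤ pos) by omega), if_pos (show n ≤ 0 ∨ pos < 1 by omega)]
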